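-- pv_equiv track=rewrite | github.com/vardaan-aggr/Introduction-to-Programming | Assingment 3/Q2.py | gate_keeper
-- ===== SOURCE A (Python) =====
-- def gate_keeper(gate_number_lis,entery_exit_status_lis,gateNum):
--     index=-1
--     ge1=0  # enter
--     ge2=0
--     ge3=0
--     ge4=0
--     ge5=0
--
--     go1=0  # out / exit
--     go2=0
--     go3=0
--     go4=0
--     go5=0
--
--     for gate_num in gate_number_lis:
--         index+=1
--         if entery_exit_status_lis[index]=="EXIT":
--             if int(gate_num)==1:go1+=1
--             if int(gate_num)==2:go2+=1
--             if int(gate_num)==3:go3+=1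
--             if int(gate_num)==4:go4+=1
--             if int(gate_num)==5:go5+=1
--         else:
--             if int(gate_num)==1:ge1+=1
--             if int(gate_num)==2:ge2+=1
--             if int(gate_num)==3:ge3+=1
--             if int(gate_num)==4:ge4+=1
--             if int(gate_num)==5:ge5+=1
--     if int(gateNum)==1:return ge1,go1
--     if int(gateNum)==2:return ge2,go2
--     if int(gateNum)==3:return ge3,go3
--     if int(gateNum)==4:return ge4,go4
--     if int(gateNum)==5:return ge5,go5
-- ===== SOURCE B (Python) =====
-- def gate_keeper(gate_number_lis, entery_exit_status_lis, gateNum):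
--     if not (1 <= int(gateNum) <= 5):
--         return None
--     enter = 0
--     exit_ = 0
--     i = 0
--     for g in gate_number_lis:
--         status = entery_exit_status_lis[i]
--         if int(g) == int(gateNum):
--             if status == "EXIT":
--                 exit_ += 1
--             else:
--                 enter += 1
--         i += 1
--     return enter, exit_
-- ===== Notes on version B (the rewrite author's own statement) =====
-- stated objective: simpler
-- what changed: B replaces A's ten named per-gate buckets plus a final five-way select with a single filtered pass that keeps just two counters (enter, exit) for the requested gate, guarded by an early range check.
-- outside the precondition, e.g. on gate_keeper(['1'], ['EXIT'], 7): A returns None, B returns None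
import Mathlib
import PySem

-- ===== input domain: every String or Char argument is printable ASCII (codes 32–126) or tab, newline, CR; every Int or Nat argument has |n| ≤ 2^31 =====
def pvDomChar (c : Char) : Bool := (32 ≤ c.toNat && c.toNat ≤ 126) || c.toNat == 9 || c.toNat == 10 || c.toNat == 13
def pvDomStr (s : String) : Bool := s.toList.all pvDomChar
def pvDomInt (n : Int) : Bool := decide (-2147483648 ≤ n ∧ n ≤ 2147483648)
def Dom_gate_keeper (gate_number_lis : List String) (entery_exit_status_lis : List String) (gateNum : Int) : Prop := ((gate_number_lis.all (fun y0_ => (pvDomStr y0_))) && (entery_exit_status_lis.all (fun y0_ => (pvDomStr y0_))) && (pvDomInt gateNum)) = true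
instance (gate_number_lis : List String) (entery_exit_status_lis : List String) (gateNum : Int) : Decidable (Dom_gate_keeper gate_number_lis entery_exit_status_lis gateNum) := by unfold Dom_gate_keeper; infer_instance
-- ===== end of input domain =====

-- B replaces A's ten per-gate buckets + final five-way select by one filtered pass with two
-- counters for the requested gate (objective: simpler). Equivalence on Pre_ (A raises or returns
-- None outside it).

-- ===== PORT A =====
-- A's loop state: index plus the ten counters ge1..ge5 (enter) and go1..go5 (exit).
structure GKState where
  index : Int
  ge1 : Int
  ge2 : Int
  ge3 : Int
  ge4 : Int
  ge5 : Int
  go1 : Int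
  go2 : Int
  go3 : Int
  go4 : Int
  go5 : Int
deriving Repr, DecidableEq

-- the for loop of A (Pre_ guarantees every int() succeeds and every status index is in range,
-- so the .getD defaults are never reached on admitted inputs)
def gkLoopA (statuses : List String) : List String → GKState → GKState
  | [], s => s
  | g :: rest, s =>
    let idx := s.index + 1
    let st := (PySem.List.pyGet? statuses idx).getD ""
    let n := (PySem.Int.ofStr? g).getD 0
    let s' : GKState :=
      if st == "EXIT" then
        { s with
          index := idx
          go1 := if n = 1 then s.go1 + 1 else s.go1
          go2 := if n = 2 then s.go2 + 1 else s.go2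
          go3 := if n = 3 then s.go3 + 1 else s.go3
          go4 := if n = 4 then s.go4 + 1 else s.go4
          go5 := if n = 5 then s.go5 + 1 else s.go5 }
      else
        { s with
          index := idx
          ge1 := if n = 1 then s.ge1 + 1 else s.ge1
          ge2 := if n = 2 then s.ge2 + 1 else s.ge2
          ge3 := if n = 3 then s.ge3 + 1 else s.ge3
          ge4 := if n = 4 then s.ge4 + 1 else s.ge4
          ge5 := if n = 5 then s.ge5 + 1 else s.ge5 }
    gkLoopA statuses rest s'

def gate_keeper (gate_number_lis : List String) (entery_exit_status_lis : List String) (gateNum : Int) : Int × Int :=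
  let s0 : GKState := ⟨-1, 0, 0, 0, 0, 0, 0, 0, 0, 0, 0⟩
  let s := gkLoopA entery_exit_status_lis gate_number_lis s0
  if gateNum = 1 then (s.ge1, s.go1)
  else if gateNum = 2 then (s.ge2, s.go2)
  else if gateNum = 3 then (s.ge3, s.go3)
  else if gateNum = 4 then (s.ge4, s.go4)
  else if gateNum = 5 then (s.ge5, s.go5)
  else (0, 0)  -- A falls through and returns None here; excluded by Pre_

-- ===== PORT B =====
-- B's loop: index i, and the pair (enter, exit_) for the requested gate only.
def gkLoopB (statuses : List String) (gateNum : Int) : List String → Nat → Int × Int → Int × Int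
  | [], _, acc => acc
  | g :: rest, i, (e, x) =>
    let status := (PySem.List.pyGet? statuses (i : Int)).getD ""
    let acc' : Int × Int :=
      if (PySem.Int.ofStr? g).getD 0 = gateNum then
        (if status == "EXIT" then (e, x + 1) else (e + 1, x))
      else (e, x)
    gkLoopB statuses gateNum rest (i + 1) acc'

def gate_keeper_alt (gate_number_lis : List String) (entery_exit_status_lis : List String) (gateNum : Int) : Int × Int :=
  if 1 ≤ gateNum ∧ gateNum ≤ 5 then
    gkLoopB entery_exit_status_lis gateNum gate_number_lis 0 (0, 0)
  else (0, 0)  -- B returns None here; excluded by Pre_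

-- ===== PRECONDITION & SPEC =====
-- Pre_ = exactly the inputs on which Python A returns a value of the declared pair type:
-- every gate string parses with int() (else ValueError), the status list covers every gate
-- index (else IndexError), and gateNum is 1..5 (else A falls off the end and returns None).
def Pre_gate_keeper (gate_number_lis : List String) (entery_exit_status_lis : List String) (gateNum : Int) : Prop :=
  gate_number_lis.length ≤ entery_exit_status_lis.length ∧
  (∀ g ∈ gate_number_lis, (PySem.Int.ofStr? g).isSome) ∧
  1 ≤ gateNum ∧ gateNum ≤ 5
instance (gate_number_lis : List String) (entery_exit_status_lis : List String) (gateNum : Int) : Decidable (Pre_gate_keeper gate_number_lis entery_exit_status_lis gateNum) := by unfold Pre_gate_keeper; infer_instance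

def pvWitness_gate_keeper : List String × List String × Int := (["1", "2", "1"], ["EXIT", "ENTER", "ENTER"], 1)

def Spec_gate_keeper (gate_number_lis : List String) (entery_exit_status_lis : List String) (gateNum : Int) (out : Int × Int) : Prop := out = gate_keeper_alt gate_number_lis entery_exit_status_lis gateNum
instance (gate_number_lis : List String) (entery_exit_status_lis : List String) (gateNum : Int) (out : Int × Int) : Decidable (Spec_gate_keeper gate_number_lis entery_exit_status_lis gateNum out) := by unfold Spec_gate_keeper; infer_instance

-- ===== CLAIM (what is proved, stated in full; the proofs are below) =====
def Claim_equal_gate_keeper : Prop := ∀ (gate_number_lis : List String) (entery_exit_status_lis : List String) (gateNum : Int), Dom_gate_keeper gate_number_lis entery_exit_status_lis gateNum → Pre_gate_keeper gate_number_lis entery_exit_status_lis gateNum → Spec_gate_keeper gate_number_lis entery_exit_status_lis gateNum (gate_keeper gate_number_lis entery_exit_status_lis gateNum)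

-- ===== LEMMAS AND PROOFS =====

-- project the (enter, exit) pair of gate k out of A's state
def gkSel (k : Int) (s : GKState) : Int × Int :=
  if k = 1 then (s.ge1, s.go1)
  else if k = 2 then (s.ge2, s.go2)
  else if k = 3 then (s.ge3, s.go3)
  else if k = 4 then (s.ge4, s.go4)
  else (s.ge5, s.go5)

set_option maxHeartbeats 1000000 in
theorem gkLoop_agree (statuses : List String) (k : Int)
    (hk : k = 1 ∨ k = 2 ∨ k = 3 ∨ k = 4 ∨ k = 5) :
    ∀ (gs : List String) (i : Nat) (s : GKState), s.index = (i : Int) - 1 →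
      gkSel k (gkLoopA statuses gs s) = gkLoopB statuses k gs i (gkSel k s) := by
  intro gs
  induction gs with
  | nil => intro i s _; simp [gkLoopA, gkLoopB]
  | cons g rest ih =>
    intro i s hidx
    have hacc : s.index + 1 = (i : Int) := by omega
    rcases hk with h | h | h | h | h <;> subst h <;>
    · simp only [gkLoopA, gkLoopB, hacc]
      rw [ih (i + 1) _ (by split <;> · simp only; push_cast; omega)]
      congr 1
      simp only [gkSel]
      norm_num
      split_ifs <;> rfl

-- ===== VERDICT (by name: the statement is the Claim_ definition above) =====
theorem gate_keeper_spec : Claim_equal_gate_keeper := by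
  intro gates statuses k _ hpre
  obtain ⟨_, _, h1, h5⟩ := hpre
  have hk : k = 1 ∨ k = 2 ∨ k = 3 ∨ k = 4 ∨ k = 5 := by omega
  have hagree := gkLoop_agree statuses k hk gates 0 ⟨-1, 0, 0, 0, 0, 0, 0, 0, 0, 0, 0⟩ (by simp)
  unfold Spec_gate_keeper gate_keeper gate_keeper_alt
  simp only [h1, h5, and_self, if_true]
  have hsel0 : gkSel k (⟨-1, 0, 0, 0, 0, 0, 0, 0, 0, 0, 0⟩ : GKState) = (0, 0) := by
    unfold gkSel; split_ifs <;> rfl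
  rw [hsel0] at hagree
  rw [← hagree]
  rcases hk with h | h | h | h | h <;> subst h <;> simp [gkSel]
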